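-- pv_equiv track=rewrite | github.com/HGWright/qa-python-assessment-2 | questions/python2.py | nine
-- ===== SOURCE A (Python) =====
-- def nine(string1, string2):
--     matches1 = []
--     matches2 = []
--     for i in string1:
--         if string1.count(i) <= string2.count(i):
--             matches1.append(i)
--     for i in string2:
--         if string2.count(i) <= string1.count(i):
--             matches2.append(i)
--     if len(matches1) == len(string1) or len(matches2) == len(string2):
--         return True
--     else:
--         return False
-- ===== SOURCE B (Python) =====
-- def nine(string1, string2):
--     def covered(a, b):
--         # a, b sorted lists; True iff a is a sub-multiset of b (merge walk)
--         j = 0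
--         for ch in a:
--             while j < len(b) and b[j] < ch:
--                 j += 1
--             if j == len(b) or b[j] != ch:
--                 return False
--             j += 1
--         return True
--     s1 = sorted(string1)
--     s2 = sorted(string2)
--     return covered(s1, s2) or covered(s2, s1)
-- ===== Notes on version B (the rewrite author's own statement) =====
-- stated objective: faster
-- what changed: A rescans both strings with str.count per character and compares accumulated match-list lengths; B sorts both strings once and decides sub-multiset containment in each direction by a single two-pointer merge walk over the sorted lists.
import Mathlib
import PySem

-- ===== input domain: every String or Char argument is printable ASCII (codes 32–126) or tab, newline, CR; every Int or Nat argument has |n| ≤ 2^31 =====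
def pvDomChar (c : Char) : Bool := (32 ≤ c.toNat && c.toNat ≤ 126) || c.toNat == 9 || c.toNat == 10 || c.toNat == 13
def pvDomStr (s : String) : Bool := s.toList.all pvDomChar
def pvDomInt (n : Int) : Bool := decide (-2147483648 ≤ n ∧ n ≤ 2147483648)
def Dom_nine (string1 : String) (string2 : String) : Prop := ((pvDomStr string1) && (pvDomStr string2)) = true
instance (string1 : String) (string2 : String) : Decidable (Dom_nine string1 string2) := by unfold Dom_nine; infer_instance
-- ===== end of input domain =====

-- B replaces A's quadratic per-character str.count rescans by sorting both
-- strings and deciding sub-multiset containment with a two-pointer merge walk (faster).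

-- ===== PORT A =====
def nine (string1 : String) (string2 : String) : Bool :=
  let matches1 := string1.toList.foldl (fun acc i =>
    if PySem.Str.count string1 (String.ofList [i]) ≤ PySem.Str.count string2 (String.ofList [i])
    then acc ++ [i] else acc) []
  let matches2 := string2.toList.foldl (fun acc i =>
    if PySem.Str.count string2 (String.ofList [i]) ≤ PySem.Str.count string1 (String.ofList [i])
    then acc ++ [i] else acc) []
  if (matches1.length : Int) = PySem.Str.len string1 ∨ (matches2.length : Int) = PySem.Str.len string2
  then true else false

-- ===== PORT B =====
-- the merge walk of Source B's `covered`, phrased on the unconsumed suffixes: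
-- skip b-elements below the current a-element, match it, else fail
def coveredB : List Char → List Char → Bool
  | [], _ => true
  | _ :: _, [] => false
  | a :: as, b :: bs =>
    if b < a then coveredB (a :: as) bs
    else if b = a then coveredB as bs
    else false
termination_by x y => x.length + y.length

def nine_alt (string1 : String) (string2 : String) : Bool :=
  let s1 := PySem.List.sorted string1.toList (fun x => x) false
  let s2 := PySem.List.sorted string2.toList (fun x => x) false
  coveredB s1 s2 || coveredB s2 s1

-- ===== PRECONDITION & SPEC =====
def Spec_nine (string1 : String) (string2 : String) (out : Bool) : Prop := out = nine_alt string1 string2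
instance (string1 : String) (string2 : String) (out : Bool) : Decidable (Spec_nine string1 string2 out) := by unfold Spec_nine; infer_instance

-- ===== CLAIM (what is proved, stated in full; the proofs are below) =====
def Claim_equal_nine : Prop := ∀ (string1 : String) (string2 : String), Dom_nine string1 string2 → Spec_nine string1 string2 (nine string1 string2)

-- ===== LEMMAS AND PROOFS =====

theorem count_go_single (c : Char) (s : List Char) (fuel acc : Nat) (h : s.length ≤ fuel) :
    PySem.Chars.count.go [c] fuel s acc = acc + s.count c := by
  induction fuel generalizing s acc with
  | zero =>
    cases s with
    | nil => simp [PySem.Chars.count.go]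
    | cons a t => simp at h
  | succ n ih =>
    cases s with
    | nil => simp [PySem.Chars.count.go]
    | cons a t =>
      simp only [PySem.Chars.count.go]
      by_cases hc : c = a
      · subst hc
        simp [List.isPrefixOf, ih t (acc + 1) (by simpa using h)]
        omega
      · have hp : [c].isPrefixOf (a :: t) = false := by
          simp [List.isPrefixOf, hc]
        simp [hp, Ne.symm hc, ih t acc (by simpa using Nat.le_of_succ_le_succ h)]

theorem count_single (s : List Char) (c : Char) : PySem.Chars.count s [c] = s.count c := by
  simp [PySem.Chars.count, count_go_single c s s.length 0 le_rfl]

-- one side of A: the match list keeps every character iff counts dominate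
theorem a_side (s t : String) :
    ((s.toList.foldl (fun acc i =>
        if PySem.Str.count s (String.ofList [i]) ≤ PySem.Str.count t (String.ofList [i])
        then acc ++ [i] else acc) []).length : Int) = PySem.Str.len s
      ↔ ∀ i ∈ s.toList, s.toList.count i ≤ t.toList.count i := by
  rw [PySem.List.foldl_append_ite_eq_filter]
  simp only [List.nil_append, PySem.Str.len_eq, PySem.Str.count_eq]
  have hc : ∀ (u : String) (i : Char),
      PySem.Chars.count u.toList (String.ofList [i]).toList = u.toList.count i := by
    intro u i
    simpa using count_single u.toList i
  constructor
  · intro h i hi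
    have hlen : (s.toList.filter (fun i => decide (PySem.Chars.count s.toList (String.ofList [i]).toList ≤ PySem.Chars.count t.toList (String.ofList [i]).toList))).length = s.toList.length := by
      exact_mod_cast h
    have := (List.length_filter_eq_length_iff).mp hlen i hi
    simpa [count_single] using (by simpa using this : PySem.Chars.count s.toList [i] ≤ PySem.Chars.count t.toList [i])
  · intro h
    have : (s.toList.filter (fun i => decide (PySem.Chars.count s.toList (String.ofList [i]).toList ≤ PySem.Chars.count t.toList (String.ofList [i]).toList))).length = s.toList.length := by
      apply (List.length_filter_eq_length_iff).mpr
      intro i hi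
      simp only [decide_eq_true_eq]
      have := h i hi
      rw [hc s i, hc t i]
      exact this
    exact_mod_cast this

-- the merge walk on two sorted lists decides multiset domination
theorem coveredB_iff (x y : List Char)
    (hx : x.Pairwise (· ≤ ·)) (hy : y.Pairwise (· ≤ ·)) :
    coveredB x y = true ↔ ∀ c : Char, x.count c ≤ y.count c := by
  induction x, y using coveredB.induct with
  | case1 y => simp [coveredB]
  | case2 a as =>
    refine iff_of_false (by simp [coveredB]) ?_
    intro h
    have := h a
    simp at this
  | case3 a as b bs hba ih =>
    have hxa : ∀ c ∈ as, a ≤ c := (List.pairwise_cons.mp hx).1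
    have hb0 : (a :: as).count b = 0 := by
      rw [List.count_eq_zero]
      intro hmem
      rcases List.mem_cons.mp hmem with h1 | h1
      · exact absurd h1.symm (ne_of_gt hba)
      · exact not_le.mpr (lt_of_lt_of_le hba (hxa b h1)) (le_refl b)
    rw [coveredB, if_pos hba, ih hx (List.pairwise_cons.mp hy).2]
    constructor
    · intro h c
      by_cases e : b = c
      · subst e; simp [hb0]
      · have := h c
        simp only [List.count_cons, beq_iff_eq] at this ⊢
        omega
    · intro h c
      have := h c
      by_cases e : b = c
      · subst e; simp [hb0]
      · simp only [List.count_cons, beq_iff_eq, if_neg e] at this ⊢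
        omega
  | case4 as b bs hba ih =>
    rw [coveredB, if_neg hba, if_pos rfl,
      ih (List.pairwise_cons.mp hx).2 (List.pairwise_cons.mp hy).2]
    constructor
    · intro h c
      have := h c
      simp only [List.count_cons, beq_iff_eq] at this ⊢
      omega
    · intro h c
      have := h c
      simp only [List.count_cons, beq_iff_eq] at this
      omega
  | case5 a as b bs hba hbe =>
    have hab : a < b := lt_of_le_of_ne (not_lt.mp hba) (Ne.symm hbe)
    have h0 : (b :: bs).count a = 0 := by
      rw [List.count_eq_zero]
      intro hmem
      rcases List.mem_cons.mp hmem with h1 | h1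
      · exact absurd h1 (ne_of_lt hab)
      · exact not_le.mpr (lt_of_lt_of_le hab ((List.pairwise_cons.mp hy).1 a h1)) (le_refl a)
    refine iff_of_false (by simp [coveredB, hba, hbe]) ?_
    intro h
    have := h a
    rw [h0] at this
    simp [List.count_cons_self] at this

-- counts are invariant under the sort, and domination over all chars
-- collapses to domination over the members of the left string
theorem alt_side (s t : String) :
    coveredB (PySem.List.sorted s.toList (fun x => x) false)
             (PySem.List.sorted t.toList (fun x => x) false) = true
      ↔ ∀ i ∈ s.toList, s.toList.count i ≤ t.toList.count i := by
  rw [coveredB_iff _ _ (PySem.List.sorted_pairwise ..) (PySem.List.sorted_pairwise ..)]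
  have hs := PySem.List.sorted_perm s.toList (fun x => x) false
  have ht := PySem.List.sorted_perm t.toList (fun x => x) false
  constructor
  · intro h i _
    have := h i
    rwa [hs.count_eq, ht.count_eq] at this
  · intro h c
    rw [hs.count_eq, ht.count_eq]
    by_cases hc : c ∈ s.toList
    · exact h c hc
    · simp [List.count_eq_zero_of_not_mem hc]

-- ===== VERDICT (by name: the statement is the Claim_ definition above) =====
theorem nine_spec : Claim_equal_nine := by
  intro s t _
  unfold Spec_nine nine nine_alt
  rw [Bool.eq_iff_iff]
  simp only [Bool.or_eq_true, Bool.if_true_left, Bool.or_false, decide_eq_true_eq]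
  rw [alt_side s t, alt_side t s]
  exact or_congr (a_side s t).symm (a_side t s).symm |>.symm
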